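-- pv_equiv track=rewrite | github.com/agentOfChaos/pyVampireHunter | datamanipulator/dataman.py | verticalCategories
-- ===== SOURCE A (Python) =====
-- from collections import OrderedDict
--
-- def verticalCategories(tables):
--     categories = OrderedDict()
--     for k,v in tables.items():
--         categories[k] = OrderedDict()
--         for entry in v:
--             for h,w in entry.items():
--                 if h in categories[k].keys():
--                     if not w in categories[k][h]:
--                         categories[k][h].append(w)
--                 else:
--                     categories[k][h] = [w]
--     return categories
-- ===== SOURCE B (Python) =====
-- from collections import OrderedDict
--
-- def _dedup(vals):
--     uniq = []
--     for w in vals: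
--         if w not in uniq:
--             uniq = uniq + [w]
--     return uniq
--
-- def _buckets(v):
--     b = OrderedDict()
--     for entry in v:
--         for h, w in entry.items():
--             b[h] = b.get(h, []) + [w]
--     return b
--
-- def verticalCategories(tables):
--     return OrderedDict(
--         (k, OrderedDict((h, _dedup(vals)) for h, vals in _buckets(v).items()))
--         for k, v in tables.items())
-- ===== Notes on version B (the rewrite author's own statement) =====
-- stated objective: alternative
-- what changed: A makes one pass, conditionally growing value lists inside one globally mutated nested dict with a per-value membership test; B is a per-table two-pass decomposition: first collect every value per header with duplicates kept, then deduplicate each list in a separate pass.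
import Mathlib
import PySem

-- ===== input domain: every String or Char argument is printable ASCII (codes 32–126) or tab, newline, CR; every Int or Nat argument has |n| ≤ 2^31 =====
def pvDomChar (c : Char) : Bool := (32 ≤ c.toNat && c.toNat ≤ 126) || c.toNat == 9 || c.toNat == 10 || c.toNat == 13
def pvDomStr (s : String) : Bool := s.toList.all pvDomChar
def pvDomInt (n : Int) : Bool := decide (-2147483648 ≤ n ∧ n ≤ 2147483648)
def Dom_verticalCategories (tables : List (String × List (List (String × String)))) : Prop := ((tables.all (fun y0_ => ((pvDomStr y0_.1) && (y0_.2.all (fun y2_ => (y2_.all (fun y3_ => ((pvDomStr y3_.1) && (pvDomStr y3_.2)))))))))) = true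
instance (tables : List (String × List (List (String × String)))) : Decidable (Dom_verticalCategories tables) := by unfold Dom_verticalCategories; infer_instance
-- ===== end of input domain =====

-- B replaces A's single pass over one globally mutated nested dict (conditional insert of each value)
-- by a per-table two-pass decomposition: collect every value per header with duplicates, then dedup
-- each list in a second pass; objective: alternative (same asymptotic cost).

-- ===== PORT A =====
-- The dict parameters arrive as association lists; PySem.Dict.ofList is Python's dict built from
-- those pairs, and `.items.foldl` is `for k, v in d.items():`.
def verticalCategories (tables : List (String × List (List (String × String)))) : List (String × List (String × List String)) :=
  (((PySem.Dict.ofList tables).items.foldl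
      (fun cats kv =>
        let cats1 := cats.insert kv.1 PySem.Dict.empty      -- categories[k] = OrderedDict()
        kv.2.foldl (fun c entry =>
          (PySem.Dict.ofList entry).items.foldl (fun c hw =>
            let inner := c.getD kv.1 PySem.Dict.empty
            if inner.contains hw.1 then                      -- if h in categories[k].keys():
              if hw.2 ∈ inner.getD hw.1 [] then c            --   if not w in categories[k][h]: (else: no-op)
              else c.insert kv.1 (inner.insert hw.1 (inner.getD hw.1 [] ++ [hw.2]))  -- .append(w)
            else c.insert kv.1 (inner.insert hw.1 [hw.2]))   -- categories[k][h] = [w]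
            c) cats1)
      (PySem.Dict.empty : PySem.Dict String (PySem.Dict String (List String)))
    ).items.map (fun p => (p.1, p.2.items)))

-- ===== PORT B =====
def pvAdd (uniq : List String) (w : String) : List String :=
  if w ∈ uniq then uniq else uniq ++ [w]

-- _dedup: keep first occurrences
def pvDedup (vals : List String) : List String :=
  vals.foldl pvAdd []

-- _buckets: collect all values per header, duplicates kept
def pvBuckets (v : List (List (String × String))) : PySem.Dict String (List String) :=
  v.foldl (fun b entry =>
    (PySem.Dict.ofList entry).items.foldl
      (fun b hw => b.modify hw.1 [] (fun l => l ++ [hw.2])) b)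
    PySem.Dict.empty

-- the OrderedDict comprehensions run over already-unique keys, so they port as List.map
def verticalCategories_alt (tables : List (String × List (List (String × String)))) : List (String × List (String × List String)) :=
  (PySem.Dict.ofList tables).items.map
    (fun kv => (kv.1, (pvBuckets kv.2).items.map (fun p => (p.1, pvDedup p.2))))

-- ===== PRECONDITION & SPEC =====
def Spec_verticalCategories (tables : List (String × List (List (String × String)))) (out : List (String × List (String × List String))) : Prop := out = verticalCategories_alt tables
instance (tables : List (String × List (List (String × String)))) (out : List (String × List (String × List String))) : Decidable (Spec_verticalCategories tables out) := by unfold Spec_verticalCategories; infer_instance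

-- ===== CLAIM (what is proved, stated in full; the proofs are below) =====
def Claim_equal_verticalCategories : Prop := ∀ (tables : List (String × List (List (String × String)))), Dom_verticalCategories tables → Spec_verticalCategories tables (verticalCategories tables)

-- ===== LEMMAS AND PROOFS =====

-- A's inner step, acting on the dict for one table key
def pvStepI (i : PySem.Dict String (List String)) (p : String × String) : PySem.Dict String (List String) :=
  if i.contains p.1 then
    if p.2 ∈ i.getD p.1 [] then i
    else i.insert p.1 (i.getD p.1 [] ++ [p.2])
  else i.insert p.1 [p.2]

-- A's per-table result
def pvInnerA (v : List (List (String × String))) : PySem.Dict String (List String) :=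
  v.foldl (fun i entry => (PySem.Dict.ofList entry).items.foldl pvStepI i) PySem.Dict.empty

-- one step of A's innermost loop only touches key k of the outer dict
theorem pv_stepA_insert (cats : PySem.Dict String (PySem.Dict String (List String)))
    (k : String) (i : PySem.Dict String (List String)) (p : String × String) :
    (let inner := (cats.insert k i).getD k PySem.Dict.empty
     if inner.contains p.1 then
       if p.2 ∈ inner.getD p.1 [] then cats.insert k i
       else (cats.insert k i).insert k (inner.insert p.1 (inner.getD p.1 [] ++ [p.2]))
     else (cats.insert k i).insert k (inner.insert p.1 [p.2]))
    = cats.insert k (pvStepI i p) := by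
  simp only [PySem.Dict.getD_insert_self, pvStepI]
  split_ifs <;> simp [PySem.Dict.insert_insert_self]

-- A's innermost loop only touches key k
theorem pv_foldA_insert (l : List (String × String))
    (cats : PySem.Dict String (PySem.Dict String (List String)))
    (k : String) (i : PySem.Dict String (List String)) :
    l.foldl (fun c hw =>
        let inner := c.getD k PySem.Dict.empty
        if inner.contains hw.1 then
          if hw.2 ∈ inner.getD hw.1 [] then c
          else c.insert k (inner.insert hw.1 (inner.getD hw.1 [] ++ [hw.2]))
        else c.insert k (inner.insert hw.1 [hw.2])) (cats.insert k i)
    = cats.insert k (l.foldl pvStepI i) := by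
  induction l generalizing i with
  | nil => rfl
  | cons p l ih =>
      simp only [List.foldl_cons]
      rw [show (let inner := (cats.insert k i).getD k PySem.Dict.empty
          if inner.contains p.1 then
            if p.2 ∈ inner.getD p.1 [] then cats.insert k i
            else (cats.insert k i).insert k (inner.insert p.1 (inner.getD p.1 [] ++ [p.2]))
          else (cats.insert k i).insert k (inner.insert p.1 [p.2])) = cats.insert k (pvStepI i p)
        from pv_stepA_insert cats k i p]
      exact ih (pvStepI i p)

-- A's entries loop only touches key k
theorem pv_entriesA_insert (v : List (List (String × String)))
    (cats : PySem.Dict String (PySem.Dict String (List String)))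
    (k : String) (i : PySem.Dict String (List String)) :
    v.foldl (fun c entry =>
        (PySem.Dict.ofList entry).items.foldl (fun c hw =>
          let inner := c.getD k PySem.Dict.empty
          if inner.contains hw.1 then
            if hw.2 ∈ inner.getD hw.1 [] then c
            else c.insert k (inner.insert hw.1 (inner.getD hw.1 [] ++ [hw.2]))
          else c.insert k (inner.insert hw.1 [hw.2])) c) (cats.insert k i)
    = cats.insert k (v.foldl (fun i entry => (PySem.Dict.ofList entry).items.foldl pvStepI i) i) := by
  induction v generalizing i with
  | nil => rfl
  | cons e v ih =>
      simp only [List.foldl_cons]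
      rw [pv_foldA_insert]
      exact ih _

-- getD after A's per-key fold: the dedup fold of the values filed under c
theorem pv_getD_foldI (l : List (String × String)) (d : PySem.Dict String (List String)) (c : String) :
    (l.foldl pvStepI d).getD c [] =
      ((l.filter (fun p => p.1 == c)).map (fun p => p.2)).foldl pvAdd (d.getD c []) := by
  induction l generalizing d with
  | nil => rfl
  | cons p l ih =>
      simp only [List.foldl_cons, List.filter_cons]
      by_cases hc : p.1 = c
      · subst hc
        simp only [beq_self_eq_true, if_pos, List.map_cons, List.foldl_cons]
        rw [ih]
        congr 1
        -- (pvStepI d p).getD p.1 [] = pvAdd (d.getD p.1 []) p.2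
        unfold pvStepI pvAdd
        by_cases h1 : d.contains p.1
        · simp only [h1, if_true]
          by_cases h2 : p.2 ∈ d.getD p.1 []
          · simp [h2]
          · simp [h2, PySem.Dict.getD_insert_self]
        · have h1' : d.contains p.1 = false := by simpa using h1
          rw [PySem.Dict.getD_of_not_contains d [] h1']
          simp [h1', PySem.Dict.getD_insert_self]
      · have hb : (p.1 == c) = false := by simpa using hc
        simp only [hb, if_neg, Bool.false_eq_true, not_false_eq_true]
        rw [ih]
        congr 1
        -- (pvStepI d p).getD c [] = d.getD c []
        unfold pvStepI
        have hne : c ≠ p.1 := fun h => hc h.symm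
        split_ifs <;> simp [PySem.Dict.getD_insert_of_ne _ _ _ hne]
  
-- keys after A's per-key fold
theorem pv_keys_foldI (l : List (String × String)) (d : PySem.Dict String (List String)) :
    (l.foldl pvStepI d).keys = PySem.Set.update d.keys (l.map (fun p => p.1)) := by
  induction l generalizing d with
  | nil => rfl
  | cons p l ih =>
      simp only [List.foldl_cons, List.map_cons, PySem.Set.update_cons]
      rw [ih]
      congr 1
      -- (pvStepI d p).keys = d.keys.add p.1
      unfold pvStepI
      by_cases h1 : d.contains p.1
      · have hm : p.1 ∈ d.keys := (PySem.Dict.contains_iff_mem_keys d p.1).mp h1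
        rw [PySem.Set.add_of_mem hm]
        split_ifs with h2
        · rfl
        · exact PySem.Dict.keys_insert_of_contains d _ h1
      · have h1' : d.contains p.1 = false := by simpa using h1
        have hm : p.1 ∉ d.keys := fun h => h1 ((PySem.Dict.contains_iff_mem_keys d p.1).mpr h)
        rw [PySem.Set.add_of_not_mem hm]
        simp only [h1', Bool.false_eq_true, if_neg, not_false_eq_true]
        exact PySem.Dict.keys_insert_of_not_contains d _ h1'

-- both double folds over (entries, entry items) are single folds over the flattened pair list
theorem pv_double_fold {σ : Type} (v : List (List (String × String)))
    (f : σ → (String × String) → σ) (init : σ) :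
    v.foldl (fun a entry => (PySem.Dict.ofList entry).items.foldl f a) init
      = ((v.map (fun e => (PySem.Dict.ofList e).items)).flatten).foldl f init := by
  rw [List.foldl_flatten, List.foldl_map]

-- per table: A's dict is B's buckets with each value list deduplicated
theorem pv_table_eq (v : List (List (String × String))) :
    (pvInnerA v).items = (pvBuckets v).items.map (fun p => (p.1, pvDedup p.2)) := by
  set ps := (v.map (fun e => (PySem.Dict.ofList e).items)).flatten with hps
  have hA : pvInnerA v = ps.foldl pvStepI PySem.Dict.empty := by
    unfold pvInnerA; rw [pv_double_fold]
  have hB : pvBuckets v = ps.foldl (fun d p => d.modify p.1 [] (fun l => l ++ [p.2])) PySem.Dict.empty := by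
    unfold pvBuckets; rw [pv_double_fold]
  -- keys agree
  have hkB : (pvBuckets v).keys = PySem.Set.ofList (ps.map (fun p => p.1)) := by
    rw [hB, PySem.Dict.keys_foldl_modify_key ps (fun p => p.1) [] (fun _ p l => l ++ [p.2]),
      PySem.Dict.keys_empty, PySem.Set.update_nil_left]
  have hkA : (pvInnerA v).keys = PySem.Set.ofList (ps.map (fun p => p.1)) := by
    rw [hA, pv_keys_foldI, PySem.Dict.keys_empty, PySem.Set.update_nil_left]
  have hndk : (PySem.Set.ofList (ps.map (fun p => p.1))).Nodup := PySem.Set.nodup_ofList _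
  rw [PySem.Dict.items_eq_map_keys (pvInnerA v) (hkA ▸ hndk) [],
      PySem.Dict.items_eq_map_keys (pvBuckets v) (hkB ▸ hndk) [],
      hkA, hkB, List.map_map]
  refine List.map_congr_left (fun c _ => ?_)
  show (c, (pvInnerA v).getD c []) = (c, pvDedup ((pvBuckets v).getD c []))
  rw [hA, hB, pv_getD_foldI, PySem.Dict.getD_foldl_modify_append, PySem.Dict.getD_empty]
  rfl

-- ===== VERDICT (by name: the statement is the Claim_ definition above) =====
theorem verticalCategories_spec : Claim_equal_verticalCategories := by
  intro tables _
  unfold Spec_verticalCategories verticalCategories verticalCategories_alt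
  have hfun :
      (fun (cats : PySem.Dict String (PySem.Dict String (List String)))
           (kv : String × List (List (String × String))) =>
          let cats1 := cats.insert kv.1 PySem.Dict.empty
          kv.2.foldl (fun c entry =>
            (PySem.Dict.ofList entry).items.foldl (fun c hw =>
              let inner := c.getD kv.1 PySem.Dict.empty
              if inner.contains hw.1 then
                if hw.2 ∈ inner.getD hw.1 [] then c
                else c.insert kv.1 (inner.insert hw.1 (inner.getD hw.1 [] ++ [hw.2]))
              else c.insert kv.1 (inner.insert hw.1 [hw.2]))
              c) cats1)
      = (fun cats kv => cats.insert kv.1 (pvInnerA kv.2)) :=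
    funext fun cats => funext fun kv => pv_entriesA_insert kv.2 cats kv.1 PySem.Dict.empty
  rw [hfun]
  have hfresh : ∀ kv ∈ (PySem.Dict.ofList tables).items,
      (PySem.Dict.empty : PySem.Dict String (PySem.Dict String (List String))).contains kv.1 = false :=
    fun kv _ => PySem.Dict.contains_empty kv.1
  have hnd : ((PySem.Dict.ofList tables).items.map (fun kv => kv.1)).Nodup :=
    PySem.Dict.nodup_keys_ofList tables
  rw [PySem.Dict.items_foldl_insert_fresh (PySem.Dict.ofList tables).items
      (fun kv => kv.1) (fun kv => pvInnerA kv.2) PySem.Dict.empty hfresh hnd]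
  rw [show (PySem.Dict.empty : PySem.Dict String (PySem.Dict String (List String))).items = []
      from rfl, List.nil_append, List.map_map]
  refine List.map_congr_left (fun kv _ => ?_)
  exact congrArg (Prod.mk kv.1) (pv_table_eq kv.2)
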